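-- pv_equiv track=rewrite | github.com/MKukshev/quadrate-rag-pipeline-mvp | backend/services/thread_parser.py | clean_email_text
-- ===== SOURCE A (Python) =====
-- def clean_email_text(text: str) -> str:
--     """
--     Clean email text:
--     - Remove quoted replies (lines starting with >, |)
--     - Remove email signatures
--     - Remove forwarded headers
--     """
--     lines = text.split('\n')
--     cleaned = []
--     in_signature = False
--
--     for line in lines:
--         # Skip quoted lines
--         if line.strip().startswith(('>', '|', 'On ', '----', '====', 'From:', 'Sent:', 'To:', 'Subject:')):
--             continue
--
--         # Detect signature start
--         if line.strip() in ('--', '___', 'Best regards', 'Best,', 'Thanks,', 'Regards,'):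
--             in_signature = True
--             continue
--
--         if not in_signature:
--             cleaned.append(line)
--
--     return '\n'.join(cleaned).strip()
-- ===== SOURCE B (Python) =====
-- QUOTE_PREFIXES = ('>', '|', 'On ', '----', '====', 'From:', 'Sent:', 'To:', 'Subject:')
-- SIGNATURE_MARKERS = frozenset(('--', '___', 'Best regards', 'Best,', 'Thanks,', 'Regards,'))
--
--
-- def clean_email_text(text: str) -> str:
--     """Clean email text by a single BACKWARD pass: walk the lines last-to-first,
--     accumulating kept lines; meeting a signature marker means everything
--     accumulated so far lies after that marker, so the accumulator is cleared.
--     After the pass the accumulator holds exactly the non-quoted lines that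
--     precede every signature marker; reverse it back to original order."""
--     kept = []
--     for line in reversed(text.split('\n')):
--         s = line.strip()
--         if s in SIGNATURE_MARKERS:
--             kept.clear()
--         elif not s.startswith(QUOTE_PREFIXES):
--             kept.append(line)
--     kept.reverse()
--     return '\n'.join(kept).strip()
-- ===== Notes on version B (the rewrite author's own statement) =====
-- stated objective: alternative
-- what changed: Replaces A's forward loop carrying an in_signature flag with a single backward traversal whose accumulator is cleared whenever a signature marker is met (everything seen so far lies after the marker), reversed back at the end; no flag and no cutoff search.
import Mathlib
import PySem

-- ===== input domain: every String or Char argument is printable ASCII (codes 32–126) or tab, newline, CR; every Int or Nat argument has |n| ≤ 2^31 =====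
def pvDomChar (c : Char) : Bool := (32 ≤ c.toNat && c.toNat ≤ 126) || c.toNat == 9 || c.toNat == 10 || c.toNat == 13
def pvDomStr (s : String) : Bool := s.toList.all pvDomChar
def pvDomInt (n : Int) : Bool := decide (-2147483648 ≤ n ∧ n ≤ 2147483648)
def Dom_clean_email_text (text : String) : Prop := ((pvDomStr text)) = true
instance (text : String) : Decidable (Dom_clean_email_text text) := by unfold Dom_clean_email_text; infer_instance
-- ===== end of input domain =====

-- B replaces A's forward flag-carrying loop by a single backward traversal with a
-- reset-on-marker accumulator, reversed back at the end (objective: alternative, same cost).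

-- ===== PORT A =====
-- text.split('\n') — via PySem.Chars.splitOn (exact for the nonempty separator "\n"); shared by both ports
def pvLines (text : String) : List String := (PySem.Chars.splitOn text.toList "\n".toList).map String.ofList

-- shared line predicates (identical literal tests in both Pythons)
def pvQuoted (l : String) : Bool :=
  let s := PySem.Str.strip l
  PySem.Str.startswith s ">" || PySem.Str.startswith s "|" || PySem.Str.startswith s "On " ||
  PySem.Str.startswith s "----" || PySem.Str.startswith s "====" || PySem.Str.startswith s "From:" ||
  PySem.Str.startswith s "Sent:" || PySem.Str.startswith s "To:" || PySem.Str.startswith s "Subject:"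

def pvSig (l : String) : Bool :=
  let s := PySem.Str.strip l
  s == "--" || s == "___" || s == "Best regards" || s == "Best," || s == "Thanks," || s == "Regards,"

-- A's for-loop over the lines, carrying the in_signature flag and the growing cleaned list
def cleanLoopA : List String → Bool → List String
  | [], _ => []
  | l :: ls, insig =>
    if pvQuoted l then cleanLoopA ls insig
    else if pvSig l then cleanLoopA ls true
    else if insig then cleanLoopA ls insig
    else l :: cleanLoopA ls insig

def clean_email_text (text : String) : String :=
  PySem.Str.strip (PySem.Str.join "\n" (cleanLoopA (pvLines text) false))

-- ===== PORT B =====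
-- one step of B's backward loop: clear the accumulator on a signature marker,
-- skip quoted/header lines, otherwise append (kept.append)
def stepB (kept : List String) (l : String) : List String :=
  if pvSig l then [] else if pvQuoted l then kept else kept ++ [l]

def clean_email_text_alt (text : String) : String :=
  let kept := ((pvLines text).reverse.foldl stepB []).reverse
  PySem.Str.strip (PySem.Str.join "\n" kept)

-- ===== PRECONDITION & SPEC =====
def Spec_clean_email_text (text : String) (out : String) : Prop := out = clean_email_text_alt text
instance (text : String) (out : String) : Decidable (Spec_clean_email_text text out) := by unfold Spec_clean_email_text; infer_instance

-- ===== CLAIM (what is proved, stated in full; the proofs are below) =====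
def Claim_equal_clean_email_text : Prop := ∀ (text : String), Dom_clean_email_text text → Spec_clean_email_text text (clean_email_text text)

-- ===== LEMMAS AND PROOFS =====

-- a signature-marker line never starts with a quote/header prefix
theorem pvSig_not_quoted (l : String) (h : pvSig l = true) : pvQuoted l = false := by
  unfold pvSig at h
  unfold pvQuoted
  simp only [Bool.or_eq_true, beq_iff_eq] at h
  rcases h with ((((h | h) | h) | h) | h) | h <;> rw [h] <;> decide

-- once the flag is set, A appends nothing more
theorem cleanLoopA_true (ls : List String) : cleanLoopA ls true = [] := by
  induction ls with
  | nil => rfl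
  | cons l ls ih =>
    unfold cleanLoopA
    split_ifs <;> simp_all

-- B's backward reset-on-marker pass, reversed, equals A's forward loop from a clear flag
theorem foldB_eq_loopA (ls : List String) :
    (ls.reverse.foldl stepB []).reverse = cleanLoopA ls false := by
  induction ls with
  | nil => rfl
  | cons l ls ih =>
    rw [List.reverse_cons, List.foldl_append]
    unfold cleanLoopA
    simp only [List.foldl_cons, List.foldl_nil]
    by_cases hq : pvQuoted l = true
    · have hs : pvSig l = false := by
        by_contra h
        have := pvSig_not_quoted l (by simpa using h)
        simp [this] at hq
      simp only [stepB, hq, hs, Bool.false_eq_true, if_false, if_true, ih]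
    · replace hq : pvQuoted l = false := by simpa using hq
      by_cases hs : pvSig l = true
      · simp only [stepB, hq, hs, Bool.false_eq_true, if_false, if_true,
          List.reverse_nil, cleanLoopA_true]
      · replace hs : pvSig l = false := by simpa using hs
        simp only [stepB, hq, hs, Bool.false_eq_true, if_false,
          List.reverse_append, List.reverse_cons, List.reverse_nil, List.nil_append,
          List.cons_append, ih]

-- ===== VERDICT (by name: the statement is the Claim_ definition above) =====
theorem clean_email_text_spec : Claim_equal_clean_email_text := by
  intro text _
  unfold Spec_clean_email_text clean_email_text clean_email_text_alt
  rw [foldB_eq_loopA]
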